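-- pv_equiv track=rewrite | github.com/matansharon/leetcode | python/205.py | convert_to_str_index
-- ===== SOURCE A (Python) =====
-- def convert_to_str_index(s):
--     dic={}
--     arr=[]
--     for i in range(len(s)):
--         if s[i] not in dic:
--             dic[s[i]]=i
--         arr.append(str(dic[s[i]]))
--     return " ".join(arr)
-- ===== SOURCE B (Python) =====
-- def convert_to_str_index(s):
--     out = [""] * len(s)
--     for c in dict.fromkeys(s):
--         t = str(s.index(c))
--         for i, x in enumerate(s):
--             if x == c:
--                 out[i] = t
--     return " ".join(out)
-- ===== Notes on version B (the rewrite author's own statement) =====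
-- stated objective: alternative
-- what changed: Replaced A's single left-to-right pass that builds a dict and appends per character by a scatter algorithm: iterate over the distinct characters (dict.fromkeys order), compute each one's first-occurrence index once, and write it into every position of that character in a pre-allocated output array.
import Mathlib
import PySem

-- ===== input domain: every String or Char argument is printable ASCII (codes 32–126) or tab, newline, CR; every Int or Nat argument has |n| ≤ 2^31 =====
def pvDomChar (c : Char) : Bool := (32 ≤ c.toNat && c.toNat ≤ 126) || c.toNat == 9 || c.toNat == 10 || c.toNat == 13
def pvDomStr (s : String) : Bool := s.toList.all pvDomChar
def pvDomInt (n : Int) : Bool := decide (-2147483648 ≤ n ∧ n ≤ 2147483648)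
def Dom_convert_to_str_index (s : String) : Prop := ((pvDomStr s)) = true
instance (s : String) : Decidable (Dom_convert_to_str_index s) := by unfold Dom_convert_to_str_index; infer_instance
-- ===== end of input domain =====

-- B replaces A's single dict-building pass by a scatter algorithm: loop over the
-- distinct characters and write each one's first-occurrence index into all of its
-- positions in a pre-allocated output array (alternative; no speed claim).


-- ===== PORT A =====
-- the loop body: `if s[i] not in dic: dic[s[i]]=i` then `arr.append(str(dic[s[i]]))`
def pvStepA (st : PySem.Dict Char Int × List String) (p : Int × Char) :
    PySem.Dict Char Int × List String :=
  let dic := if st.1.contains p.2 then st.1 else st.1.insert p.2 p.1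
  (dic, st.2 ++ [PySem.Int.toStr (dic.getD p.2 0)])

-- `for i in range(len(s))` with `s[i]` ported as the loop over (i, s[i]) pairs
def convert_to_str_index (s : String) : String :=
  PySem.Str.join " " (((PySem.List.enumerate s.toList).foldl pvStepA (PySem.Dict.empty, [])).2)

-- ===== PORT B =====
-- inner loop body: `for i, x in enumerate(s): if x == c: out[i] = t`
def pvStepB (c : Char) (t : String) (o : List String) (p : Int × Char) : List String :=
  if p.2 == c then PySem.List.pySetD o p.1 t else o

-- one iteration of the outer loop: `t = str(s.index(c))` then the scatter pass
def pvFill (l : List Char) (out : List String) (c : Char) : List String :=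
  (PySem.List.enumerate l).foldl
    (pvStepB c (PySem.Int.toStr (((PySem.List.index? l c).getD 0 : Nat) : Int))) out

-- `out = [""]*len(s)`, `for c in dict.fromkeys(s): …`, `" ".join(out)`
def convert_to_str_index_alt (s : String) : String :=
  PySem.Str.join " "
    ((PySem.List.dedup s.toList).foldl (pvFill s.toList)
      (List.replicate s.toList.length ""))

-- ===== PRECONDITION & SPEC =====
def Spec_convert_to_str_index (s : String) (out : String) : Prop := out = convert_to_str_index_alt s
instance (s : String) (out : String) : Decidable (Spec_convert_to_str_index s out) := by unfold Spec_convert_to_str_index; infer_instance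

-- ===== CLAIM (what is proved, stated in full; the proofs are below) =====
def Claim_equal_convert_to_str_index : Prop := ∀ (s : String), Dom_convert_to_str_index s → Spec_convert_to_str_index s (convert_to_str_index s)

-- ===== LEMMAS AND PROOFS =====

-- the common value both sides write for a character: str of its first index in l
def pvF (l : List Char) (c : Char) : String :=
  PySem.Int.toStr (((PySem.List.index? l c).getD 0 : Nat) : Int)

---- A-side: the fold produces l.map (pvF l) --------------------------------

lemma pv_index?_append_cons_self (done t : List Char) (c : Char) (h : c ∉ done) :
    PySem.List.index? (done ++ c :: t) c = some done.length := by
  rw [PySem.List.index?_eq_some_iff]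
  exact ⟨done, t, rfl, rfl, h⟩

lemma pv_index?_append_singleton (done : List Char) (c c' : Char) :
    PySem.List.index? (done ++ [c]) c' =
      if c' ∈ done then PySem.List.index? done c'
      else if c' = c then some done.length else none := by
  by_cases hmem : c' ∈ done
  · simp only [hmem, if_true]
    exact PySem.List.index?_append_of_mem _ hmem
  · simp only [hmem, if_false]
    by_cases hc : c' = c
    · subst hc
      simp only [if_true]
      exact PySem.List.index?_append_singleton_self _ _ hmem
    · simp only [hc, if_false]
      rw [PySem.List.index?_eq_none_iff]
      simp [hmem, hc]

-- main invariant: if dic records exactly the first-occurrence indices of the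
-- already-processed prefix `done`, the rest of the fold appends pvF's values
lemma pv_mainA (l : List Char) : ∀ (rest done : List Char), done ++ rest = l →
    ∀ (dic : PySem.Dict Char Int) (arr : List String),
    (∀ c, dic.get? c = (PySem.List.index? done c).map Int.ofNat) →
    ((PySem.List.enumerate rest (done.length : Int)).foldl pvStepA (dic, arr)).2
      = arr ++ rest.map (pvF l) := by
  intro rest
  induction rest with
  | nil => intro done _ dic arr _; simp [PySem.List.enumerate_nil]
  | cons c rest' ih =>
    intro done hl dic arr hinv
    rw [PySem.List.enumerate_cons, List.foldl_cons]
    have hl' : (done ++ [c]) ++ rest' = l := by rw [← hl]; simp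
    have hlen : (done.length : Int) + 1 = ((done ++ [c]).length : Int) := by simp
    by_cases hc : c ∈ done
    · -- already seen: dict unchanged, value is the old first index
      obtain ⟨k, hk⟩ : ∃ k, PySem.List.index? done c = some k :=
        Option.isSome_iff_exists.mp ((PySem.List.index?_isSome_iff done c).2 hc)
      have hget : dic.get? c = some (Int.ofNat k) := by rw [hinv c, hk]; rfl
      have hcont : dic.contains c = true := by
        rw [PySem.Dict.contains_eq_isSome_get?, hget]; rfl
      have hstep : pvStepA (dic, arr) ((done.length : Int), c)
          = (dic, arr ++ [PySem.Int.toStr (Int.ofNat k)]) := by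
        simp [pvStepA, hcont, PySem.Dict.getD_of_get?_eq_some _ 0 hget]
      have hfull : PySem.List.index? l c = some k := by
        rw [← hl, PySem.List.index?_append_of_mem _ hc, hk]
      rw [hstep, hlen, ih (done ++ [c]) hl' dic (arr ++ [PySem.Int.toStr (Int.ofNat k)]) ?_]
      · simp only [List.map_cons, pvF, hfull]; simp
      · intro c'
        rw [hinv c', pv_index?_append_singleton]
        by_cases h1 : c' ∈ done
        · simp [h1]
        · have h2 : c' ≠ c := fun h => h1 (h ▸ hc)
          simp [h1, h2]
    · -- first occurrence: insert, value is the current position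
      have hget : dic.get? c = none := by
        rw [hinv c, (PySem.List.index?_eq_none_iff done c).2 hc]; rfl
      have hcont : dic.contains c = false := by
        rw [PySem.Dict.contains_eq_isSome_get?, hget]; rfl
      have hgetins : (dic.insert c (done.length : Int)).get? c = some (done.length : Int) :=
        PySem.Dict.get?_insert_self _ _ _
      have hstep : pvStepA (dic, arr) ((done.length : Int), c)
          = (dic.insert c (done.length : Int),
             arr ++ [PySem.Int.toStr (done.length : Int)]) := by
        simp [pvStepA, hcont, PySem.Dict.getD_of_get?_eq_some _ 0 hgetins]
      have hfull : PySem.List.index? l c = some done.length := by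
        rw [← hl]; exact pv_index?_append_cons_self _ _ _ hc
      rw [hstep, hlen, ih (done ++ [c]) hl' _ _ ?_]
      · simp only [List.map_cons, pvF, hfull]; simp
      · intro c'
        by_cases h2 : c' = c
        · subst h2
          rw [hgetins, pv_index?_append_singleton, if_neg hc, if_pos rfl]; rfl
        · rw [PySem.Dict.get?_insert, if_neg h2, hinv c', pv_index?_append_singleton]
          by_cases h1 : c' ∈ done
          · simp [h1]
          · simp [h1, h2]

---- B-side: the scatter fold also produces l.map (pvF l) --------------------

lemma pv_stepB_length (c : Char) (t : String) :
    ∀ (ps : List (Int × Char)) (out : List String),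
    (ps.foldl (pvStepB c t) out).length = out.length := by
  intro ps
  induction ps with
  | nil => intro out; rfl
  | cons p ps' ih =>
    intro out
    rw [List.foldl_cons, ih]
    unfold pvStepB
    split
    · exact PySem.List.length_pySetD _ _ _
    · rfl

-- one scatter pass, elementwise: position j gets t iff the chunk has c at offset j-k
lemma pv_fill_get (c : Char) (t : String) :
    ∀ (rest : List Char) (k : Nat) (out : List String) (j : Nat), j < out.length →
    ((PySem.List.enumerate rest (k : Int)).foldl (pvStepB c t) out)[j]? =
      if k ≤ j ∧ rest[j - k]? = some c then some t else out[j]? := by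
  intro rest
  induction rest with
  | nil =>
    intro k out j _
    simp [PySem.List.enumerate_nil]
  | cons x rest' ih =>
    intro k out j hj
    rw [PySem.List.enumerate_cons, List.foldl_cons]
    have hk1 : ((k : Int) + 1) = ((k + 1 : Nat) : Int) := by push_cast; ring
    have hout' : (pvStepB c t out ((k : Int), x)).length = out.length := by
      unfold pvStepB
      split
      · exact PySem.List.length_pySetD _ _ _
      · rfl
    rw [hk1, ih (k + 1) _ j (by rw [hout']; exact hj)]
    by_cases hx : x = c
    · -- head matches: out[k] := t
      have hstep : pvStepB c t out ((k : Int), x) = out.set k t := by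
        simp [pvStepB, hx, PySem.List.pySetD_natCast]
      by_cases hrest : k + 1 ≤ j ∧ rest'[j - (k + 1)]? = some c
      · have hfull : k ≤ j ∧ (x :: rest')[j - k]? = some c := by
          obtain ⟨h1, h2⟩ := hrest
          refine ⟨by omega, ?_⟩
          have : j - k = (j - (k + 1)) + 1 := by omega
          rw [this]; simpa using h2
        rw [if_pos hrest, if_pos hfull]
      · by_cases hjk : j = k
        · have hfull : k ≤ j ∧ (x :: rest')[j - k]? = some c := by
            refine ⟨by omega, ?_⟩
            have : j - k = 0 := by omega
            rw [this]; simp [hx]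
          rw [if_neg hrest, if_pos hfull, hstep]
          subst hjk
          rw [List.getElem?_set_self']
          have : out[j]? = some (out[j]'hj) := List.getElem?_eq_getElem hj
          rw [this]; rfl
        · have hfull : ¬ (k ≤ j ∧ (x :: rest')[j - k]? = some c) := by
            rintro ⟨h1, h2⟩
            have hne : j - k ≠ 0 := by omega
            obtain ⟨m, hm⟩ := Nat.exists_eq_succ_of_ne_zero hne
            rw [hm] at h2
            simp only [List.getElem?_cons_succ] at h2
            exact hrest ⟨by omega, by rw [show j - (k + 1) = m from by omega]; exact h2⟩
          rw [if_neg hrest, if_neg hfull, hstep]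
          exact List.getElem?_set_ne (fun h => hjk h.symm)
    · -- head does not match: out unchanged
      have hstep : pvStepB c t out ((k : Int), x) = out := by
        simp [pvStepB, hx]
      have hiff : (k ≤ j ∧ (x :: rest')[j - k]? = some c)
          ↔ (k + 1 ≤ j ∧ rest'[j - (k + 1)]? = some c) := by
        constructor
        · rintro ⟨h1, h2⟩
          have hne : j - k ≠ 0 := by
            intro h0
            rw [h0] at h2
            exact hx (by simpa using h2)
          obtain ⟨m, hm⟩ := Nat.exists_eq_succ_of_ne_zero hne
          rw [hm] at h2
          simp only [List.getElem?_cons_succ] at h2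
          exact ⟨by omega, by rw [show j - (k + 1) = m from by omega]; exact h2⟩
        · rintro ⟨h1, h2⟩
          refine ⟨by omega, ?_⟩
          have : j - k = (j - (k + 1)) + 1 := by omega
          rw [this]; simpa using h2
      rw [hstep]
      by_cases h : k + 1 ≤ j ∧ rest'[j - (k + 1)]? = some c
      · rw [if_pos h, if_pos (hiff.2 h)]
      · rw [if_neg h, if_neg ((not_congr hiff).2 h)]

-- one outer-loop iteration, elementwise
lemma pv_fill_spec (l : List Char) (c : Char) (out : List String)
    (hlen : out.length = l.length) (j : Nat) (hj : j < l.length) (d : Char)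
    (hd : l[j]? = some d) :
    (pvFill l out c)[j]? = if d = c then some (pvF l c) else out[j]? := by
  unfold pvFill
  have h := pv_fill_get c (PySem.Int.toStr (((PySem.List.index? l c).getD 0 : Nat) : Int))
    l 0 out j (by omega)
  rw [show ((0 : Nat) : Int) = (0 : Int) from rfl] at h
  rw [h]
  simp only [Nat.zero_le, true_and, Nat.sub_zero]
  by_cases hdc : d = c
  · rw [if_pos (hdc ▸ hd), if_pos hdc]; rfl
  · rw [if_neg (fun h => hdc (Option.some.inj (hd.symm.trans h))), if_neg hdc]

lemma pv_fill_length (l : List Char) (out : List String) (c : Char) :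
    (pvFill l out c).length = out.length := by
  unfold pvFill; exact pv_stepB_length _ _ _ _

-- the outer fold, elementwise: processed characters carry pvF, others the old value
lemma pv_mainB (l : List Char) : ∀ (cs : List Char) (out : List String),
    out.length = l.length →
    (cs.foldl (pvFill l) out).length = l.length ∧
    ∀ (j : Nat), j < l.length → ∀ (d : Char), l[j]? = some d →
      (cs.foldl (pvFill l) out)[j]? = if d ∈ cs then some (pvF l d) else out[j]? := by
  intro cs
  induction cs with
  | nil => intro out hlen; exact ⟨hlen, by simp⟩
  | cons c cs' ih =>
    intro out hlen
    rw [List.foldl_cons]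
    have hlen' : (pvFill l out c).length = l.length := by
      rw [pv_fill_length]; exact hlen
    obtain ⟨ihlen, ihget⟩ := ih (pvFill l out c) hlen'
    refine ⟨ihlen, ?_⟩
    intro j hj d hd
    rw [ihget j hj d hd, pv_fill_spec l c out hlen j hj d hd]
    by_cases h1 : d ∈ cs'
    · simp [h1]
    · by_cases h2 : d = c
      · simp [h2]
      · simp [h1, h2]

lemma pv_B_eq_map (l : List Char) :
    (PySem.List.dedup l).foldl (pvFill l) (List.replicate l.length "") = l.map (pvF l) := by
  obtain ⟨hlen, hget⟩ := pv_mainB l (PySem.List.dedup l) (List.replicate l.length "") (by simp)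
  apply List.ext_getElem?
  intro j
  by_cases hj : j < l.length
  · have hd : l[j]? = some (l[j]'hj) := List.getElem?_eq_getElem hj
    rw [hget j hj _ hd]
    simp [hj]
  · rw [List.getElem?_eq_none (show (((PySem.List.dedup l).foldl (pvFill l) (List.replicate l.length "")).length) ≤ j by rw [hlen]; omega),
        List.getElem?_eq_none (by simpa using (by omega : l.length ≤ j))]

-- ===== VERDICT (by name: the statement is the Claim_ definition above) =====
theorem convert_to_str_index_spec : Claim_equal_convert_to_str_index := by
  intro s _
  unfold Spec_convert_to_str_index convert_to_str_index convert_to_str_index_alt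
  have hA := pv_mainA s.toList s.toList [] rfl PySem.Dict.empty [] (by
    intro c; simp [PySem.Dict.get?_empty])
  simp only [List.length_nil, Nat.cast_zero, List.nil_append] at hA
  rw [hA, pv_B_eq_map]
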